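-- pv_equiv track=rewrite | github.com/Dylanlala/test_main | txgextracter_server.py | decodestylestr
-- ===== SOURCE A (Python) =====
-- def decodestylestr(style_attrs, attr):
--     attrvalue = ""
--     styles = style_attrs.split(";")
--     for sty in styles:
--         k, v = sty.split(":")
--         v = v.replace("pt", "")
--         if k == attr:
--             attrvalue = v
--     return attrvalue
-- ===== SOURCE B (Python) =====
-- def decodestylestr(style_attrs, attr):
--     # Phase 1: parse every entry up front (malformed entries raise ValueError here, as in A).
--     pairs = []
--     for sty in style_attrs.split(";"):
--         k, v = sty.split(":")
--         pairs.append((k, v))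
--     # Phase 2: search back-to-front and return at the first (i.e. last) match.
--     for k, v in reversed(pairs):
--         if k == attr:
--             return v.replace("pt", "")
--     return ""
-- ===== Notes on version B (the rewrite author's own statement) =====
-- stated objective: alternative
-- what changed: Splits A's single forward accumulator loop into two phases: parse all entries into a list of (key,value) pairs, then search that list back-to-front and return early at the first match (the last occurrence), applying the 'pt' replacement only to the returned value.
import Mathlib
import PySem

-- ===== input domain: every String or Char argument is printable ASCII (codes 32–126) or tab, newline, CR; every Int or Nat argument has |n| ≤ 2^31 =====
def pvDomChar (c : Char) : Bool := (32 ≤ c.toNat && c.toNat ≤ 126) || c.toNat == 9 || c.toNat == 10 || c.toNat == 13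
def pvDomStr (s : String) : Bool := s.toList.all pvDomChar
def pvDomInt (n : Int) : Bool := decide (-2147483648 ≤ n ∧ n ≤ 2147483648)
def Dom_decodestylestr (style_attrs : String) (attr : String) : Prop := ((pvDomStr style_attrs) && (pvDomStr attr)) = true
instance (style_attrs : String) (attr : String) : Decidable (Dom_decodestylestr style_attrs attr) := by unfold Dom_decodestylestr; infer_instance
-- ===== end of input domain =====

-- B replaces A's forward accumulator loop by two phases: parse all entries into a pair list,
-- then search back-to-front with early return ('alternative', same cost).
-- s.split(sep) for the NONEMPTY literal seps ";" and ":": PySem.Str.split? is none only for sep = "", so .getD [] is never taken (exact here).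

-- ===== PORT A =====
def decodestylestr (style_attrs : String) (attr : String) : String :=
  (((PySem.Str.split? style_attrs ";").getD []).foldl (fun attrvalue sty =>
    match (PySem.Str.split? sty ":").getD [] with
    | [k, v] =>
      let v := PySem.Str.replace v "pt" ""
      if k == attr then v else attrvalue
    | _ => attrvalue)    -- Python raises ValueError here (tuple unpacking); excluded by Pre_
    "")

-- ===== PORT B =====
def decodestylestr_alt (style_attrs : String) (attr : String) : String :=
  let pairs := ((PySem.Str.split? style_attrs ";").getD []).foldl (fun acc sty =>
    let parts := (PySem.Str.split? sty ":").getD []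
    if parts.length = 2 then acc ++ [(parts[0]!, parts[1]!)]
    else acc)            -- Python raises ValueError here (tuple unpacking); excluded by Pre_
    ([] : List (String × String))
  -- 'for k, v in reversed(pairs): if k == attr: return …' = find? on the reversed list
  match pairs.reverse.find? (fun kv => kv.1 == attr) with
  | some kv => PySem.Str.replace kv.2 "pt" ""
  | none => ""

-- ===== PRECONDITION & SPEC =====
-- Both programs raise ValueError (tuple unpacking of sty.split(":")) on any ';'-entry that does not
-- contain exactly one ':'; Pre_ admits exactly the inputs where every entry splits into two parts.
def Pre_decodestylestr (style_attrs : String) (attr : String) : Prop :=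
  ∀ sty ∈ (PySem.Str.split? style_attrs ";").getD [], ((PySem.Str.split? sty ":").getD []).length = 2
instance (style_attrs : String) (attr : String) : Decidable (Pre_decodestylestr style_attrs attr) := by
  unfold Pre_decodestylestr; infer_instance

def pvWitness_decodestylestr : String × String := ("font-size:12pt;color:red;font-size:9pt", "font-size")

def Spec_decodestylestr (style_attrs : String) (attr : String) (out : String) : Prop := out = decodestylestr_alt style_attrs attr
instance (style_attrs : String) (attr : String) (out : String) : Decidable (Spec_decodestylestr style_attrs attr out) := by unfold Spec_decodestylestr; infer_instance

-- ===== CLAIM (what is proved, stated in full; the proofs are below) =====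
def Claim_equal_decodestylestr : Prop := ∀ (style_attrs : String) (attr : String), Dom_decodestylestr style_attrs attr → Pre_decodestylestr style_attrs attr → Spec_decodestylestr style_attrs attr (decodestylestr style_attrs attr)

-- ===== LEMMAS AND PROOFS =====

-- B's parse step, named for the proofs.
def pvPairStep (acc : List (String × String)) (sty : String) : List (String × String) :=
  let parts := (PySem.Str.split? sty ":").getD []
  if parts.length = 2 then acc ++ [(parts[0]!, parts[1]!)]
  else acc

lemma pvPairStep_foldl_append (l : List String) (p : List (String × String)) :
    l.foldl pvPairStep p = p ++ l.foldl pvPairStep [] := by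
  induction l generalizing p with
  | nil => simp
  | cons sty rest ih =>
    simp only [List.foldl_cons]
    rw [ih (pvPairStep p sty), ih (pvPairStep [] sty)]
    unfold pvPairStep
    dsimp only
    split <;> simp

-- Loop correspondence: A's forward accumulator equals B's backward search, with 'acc' as the
-- value when no entry of l matches.
lemma decodestylestr_loop (attr : String) (l : List String) (acc : String)
    (h : ∀ sty ∈ l, ((PySem.Str.split? sty ":").getD []).length = 2) :
    l.foldl (fun attrvalue sty =>
      match (PySem.Str.split? sty ":").getD [] with
      | [k, v] =>
        let v := PySem.Str.replace v "pt" ""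
        if k == attr then v else attrvalue
      | _ => attrvalue) acc
    = match (l.foldl pvPairStep []).reverse.find? (fun kv => kv.1 == attr) with
      | some kv => PySem.Str.replace kv.2 "pt" ""
      | none => acc := by
  induction l generalizing acc with
  | nil => simp
  | cons sty rest ih =>
    have hs := h sty (List.mem_cons_self)
    obtain ⟨k, v, hkv⟩ : ∃ k v, (PySem.Str.split? sty ":").getD [] = [k, v] := by
      match hp : (PySem.Str.split? sty ":").getD [] with
      | [k, v] => exact ⟨k, v, rfl⟩
      | [] | [_] | _ :: _ :: _ :: _ => rw [hp] at hs; simp at hs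
    have hrest := fun s hs' => h s (List.mem_cons_of_mem _ hs')
    simp only [List.foldl_cons, pvPairStep, hkv, List.length_cons, List.length_nil,
      List.getElem!_cons_zero, List.getElem!_cons_succ, reduceIte]
    rw [pvPairStep_foldl_append, ih _ hrest]
    rw [List.reverse_append, List.find?_append]
    rcases hf : (rest.foldl pvPairStep []).reverse.find? (fun kv => kv.1 == attr) with _ | kv
    · by_cases hk : k == attr <;> simp [hf, hk]
    · simp [hf]

-- ===== VERDICT (by name: the statement is the Claim_ definition above) =====
theorem decodestylestr_spec : Claim_equal_decodestylestr := by
  intro style_attrs attr _ hpre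
  unfold Spec_decodestylestr decodestylestr decodestylestr_alt
  rw [decodestylestr_loop attr _ "" hpre]
  rfl
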